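-- pv_equiv track=rewrite | github.com/Longfellow1/keypulse | keypulse/utils/text_filters.py | looks_like_ime_composition
-- ===== SOURCE A (Python) =====
-- _L5_MIN_LEN = 12
--
-- _L5_BOUNDARY_CHARS = {" ", "\t", "\n", "\r", "-", "_", ".", ",", ":", ";", "/", "\\", "(", ")", "[", "]", "{", "}"}
--
-- def looks_like_ime_composition(sample: str) -> bool:
--     """Language-neutral noise filter: detects samples that look like IME intermediate state.
--
--     Returns True if the longest run of characters between word/code boundaries is >= 12 chars
--     AND that run looks like a flat lowercase blob (not camelCase identifier).
--     Catches IME intermediate state, tokens, hashes, slugs. Skips text with CJK chars.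
--     """
--     if not sample:
--         return False
--     s = sample.strip()
--     if len(s) < _L5_MIN_LEN:
--         return False
--     # CJK / non-ASCII letters present → real prose in another script, keep
--     if any(ord(c) > 127 and c.isalpha() for c in s):
--         return False
--     # Find the longest segment between boundary chars
--     longest = ""
--     current = []
--     for c in s:
--         if c in _L5_BOUNDARY_CHARS:
--             if len(current) > len(longest):
--                 longest = "".join(current)
--             current = []
--         else:
--             current.append(c)
--     if len(current) > len(longest):
--         longest = "".join(current)
--     if len(longest) < _L5_MIN_LEN:
--         return False
--     # camelCase: ≥2 occurrences of uppercase-followed-by-lowercase → real code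
--     camelcase_signals = sum(
--         1 for i in range(len(longest) - 1)
--         if longest[i].isupper() and longest[i + 1].islower()
--     )
--     if camelcase_signals >= 2:
--         return False
--     return True
-- ===== SOURCE B (Python) =====
-- _L5_MIN_LEN = 12
--
-- _L5_BOUNDARY_CHARS = " \t\n\r-_.,:;/\\()[]{}"
--
-- def looks_like_ime_composition(sample: str) -> bool:
--     """Single streaming pass with a sentinel boundary: tracks only the length and
--     camelCase-pair count of the current and of the best run, never materialising
--     any segment string."""
--     if not sample:
--         return False
--     s = sample.strip()
--     if len(s) < _L5_MIN_LEN: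
--         return False
--     if any(ord(c) > 127 and c.isalpha() for c in s):
--         return False
--     best_len = 0
--     best_camel = 0
--     cur_len = 0
--     cur_camel = 0
--     prev = ""
--     for c in s + " ":  # trailing boundary flushes the last run
--         if c in _L5_BOUNDARY_CHARS:
--             if cur_len > best_len:
--                 best_len = cur_len
--                 best_camel = cur_camel
--             cur_len = 0
--             cur_camel = 0
--             prev = ""
--         else:
--             if prev and prev.isupper() and c.islower():
--                 cur_camel += 1
--             cur_len += 1
--             prev = c
--     if best_len < _L5_MIN_LEN:
--         return False
--     return best_camel < 2
-- ===== Notes on version B (the rewrite author's own statement) =====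
-- stated objective: alternative
-- what changed: A builds each segment as a list, joins it into the longest string and then re-scans that string with an index loop to count camelCase pairs; B is a single streaming pass with a sentinel trailing boundary that never materialises any segment, tracking only the length and camelCase-pair count of the current run and of the best run seen so far.
import Mathlib
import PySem

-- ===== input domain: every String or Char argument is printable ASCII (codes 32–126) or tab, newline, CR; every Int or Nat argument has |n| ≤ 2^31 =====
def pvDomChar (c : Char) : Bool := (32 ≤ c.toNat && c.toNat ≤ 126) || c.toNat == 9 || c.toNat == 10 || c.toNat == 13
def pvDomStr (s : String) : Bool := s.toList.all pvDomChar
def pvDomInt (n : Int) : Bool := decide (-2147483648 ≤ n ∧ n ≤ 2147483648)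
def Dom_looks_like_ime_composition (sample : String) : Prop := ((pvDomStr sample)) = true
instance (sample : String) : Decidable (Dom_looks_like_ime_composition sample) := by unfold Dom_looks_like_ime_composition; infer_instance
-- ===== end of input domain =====

-- B replaces A's build-the-longest-segment-then-count pass by a single streaming pass with a sentinel
-- boundary that tracks only the length and camelCase-pair count of the current and best run (alternative).

-- ===== PORT A =====
-- _L5_BOUNDARY_CHARS (membership test on a small literal set of chars)
def pvBoundary : List Char :=
  [' ', '\t', '\n', '\r', '-', '_', '.', ',', ':', ';', '/', '\\', '(', ')', '[', ']', '{', '}']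

-- loop body of A: state = (longest, current)
def pvStepA (st : List Char × List Char) (c : Char) : List Char × List Char :=
  if pvBoundary.contains c then
    if st.2.length > st.1.length then (st.2, ([] : List Char)) else (st.1, ([] : List Char))
  else (st.1, st.2 ++ [c])

-- camelcase_signals: sum over i in range(len(longest) - 1); the indices i, i+1 are always in
-- range, so the pyGet? 'none' branches are unreachable (Python would raise IndexError there)
def pvCamelStep (l : List Char) (acc : Int) (i : Int) : Int :=
  match PySem.List.pyGet? l i, PySem.List.pyGet? l (i + 1) with
  | some u, some v =>
      if PySem.Chars.isupper u && PySem.Chars.islower v then acc + 1 else acc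
  | _, _ => acc

def pvCamelA (longest : List Char) : Int :=
  (PySem.List.pyRange 0 ((longest.length : Int) - 1)).foldl (pvCamelStep longest) 0

def looks_like_ime_composition (sample : String) : Bool :=
  if sample.toList = [] then false
  else
    let s := PySem.Chars.strip sample.toList
    if s.length < 12 then false
    else if s.any (fun c => decide (127 < c.toNat) && PySem.Chars.isalpha c) then false
    else
      let st := s.foldl pvStepA (([] : List Char), ([] : List Char))
      let longest := if st.2.length > st.1.length then st.2 else st.1
      if longest.length < 12 then false
      else
        let camelcase_signals := pvCamelA longest
        if camelcase_signals ≥ 2 then false else true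

-- ===== PORT B =====
-- loop body of B: state = (best_len, best_camel, cur_len, cur_camel, prev); prev = none is Python's ""
def pvStepB (st : Int × Int × Int × Int × Option Char) (c : Char) :
    Int × Int × Int × Int × Option Char :=
  if pvBoundary.contains c then
    if st.2.2.1 > st.1 then (st.2.2.1, st.2.2.2.1, 0, 0, none) else (st.1, st.2.1, 0, 0, none)
  else
    (st.1, st.2.1,
     st.2.2.1 + 1,
     st.2.2.2.1 +
       (match st.2.2.2.2 with
        | some p => if PySem.Chars.isupper p && PySem.Chars.islower c then 1 else 0
        | none => 0),
     some c)

def looks_like_ime_composition_alt (sample : String) : Bool :=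
  if sample.toList = [] then false
  else
    let s := PySem.Chars.strip sample.toList
    if s.length < 12 then false
    else if s.any (fun c => decide (127 < c.toNat) && PySem.Chars.isalpha c) then false
    else
      let st := (s ++ [' ']).foldl pvStepB (0, 0, 0, 0, none)
      if st.1 < 12 then false
      else decide (st.2.1 < 2)

-- ===== PRECONDITION & SPEC =====
def Spec_looks_like_ime_composition (sample : String) (out : Bool) : Prop := out = looks_like_ime_composition_alt sample
instance (sample : String) (out : Bool) : Decidable (Spec_looks_like_ime_composition sample out) := by unfold Spec_looks_like_ime_composition; infer_instance

-- ===== CLAIM (what is proved, stated in full; the proofs are below) =====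
def Claim_equal_looks_like_ime_composition : Prop := ∀ (sample : String), Dom_looks_like_ime_composition sample → Spec_looks_like_ime_composition sample (looks_like_ime_composition sample)

-- ===== LEMMAS AND PROOFS =====

-- structural count of camelCase pairs (uppercase followed by lowercase) in a run
def pvCamel : List Char → Int
  | u :: v :: t => (if PySem.Chars.isupper u && PySem.Chars.islower v then 1 else 0) + pvCamel (v :: t)
  | _ => 0

-- contribution of appending char c after (optional) previous char
def pvPair (p? : Option Char) (c : Char) : Int :=
  match p? with
  | some p => if PySem.Chars.isupper p && PySem.Chars.islower c then 1 else 0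
  | none => 0

lemma pvCamel_snoc (l : List Char) (c : Char) :
    pvCamel (l ++ [c]) = pvCamel l + pvPair l.getLast? c := by
  induction l with
  | nil => simp [pvCamel, pvPair]
  | cons a t ih =>
    cases t with
    | nil => simp [pvCamel, pvPair]
    | cons b t' =>
      simp only [List.cons_append, pvCamel]
      rw [show (b :: (t' ++ [c])) = ((b :: t') ++ [c]) from rfl, ih]
      simp only [List.getLast?_cons_cons]
      ring

lemma pvCamelA_eq (l : List Char) : pvCamelA l = pvCamel l := by
  induction l using List.reverseRecOn with
  | nil => rfl
  | append_singleton m c ih =>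
    rcases hm : m with _ | ⟨a, t⟩
    · rfl
    · rw [← hm]
      have hn : 1 ≤ m.length := by rw [hm]; simp
      have hcast : ((m.length - 1 : Nat) : Int) = (m.length : Int) - 1 := by
        rw [Nat.cast_sub hn]; rfl
      have hlen : ((m ++ [c]).length : Int) - 1 = ((m.length - 1 : Nat) : Int) + 1 := by
        rw [hcast]; simp only [List.length_append, List.length_cons, List.length_nil]; push_cast; ring
      unfold pvCamelA
      rw [hlen, PySem.List.pyRange_one_succ_right (by positivity), List.foldl_append]
      have hinner : (PySem.List.pyRange 0 ((m.length - 1 : Nat) : Int)).foldl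
          (pvCamelStep (m ++ [c])) 0
          = (PySem.List.pyRange 0 ((m.length - 1 : Nat) : Int)).foldl (pvCamelStep m) 0 := by
        apply PySem.List.foldl_congr_mem
        intro acc i hi
        rw [PySem.List.mem_pyRange_one] at hi
        obtain ⟨hi0, hi1⟩ := hi
        obtain ⟨k, rfl⟩ := Int.eq_ofNat_of_zero_le hi0
        have hk : k + 1 < m.length := by
          rw [hcast] at hi1
          have : (k : Int) + 1 < (m.length : Int) := by omega
          exact_mod_cast this
        unfold pvCamelStep
        have h1 : PySem.List.pyGet? (m ++ [c]) (k : Int) = PySem.List.pyGet? m (k : Int) := by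
          rw [PySem.List.pyGet?_natCast, PySem.List.pyGet?_natCast,
            List.getElem?_append_left (by omega)]
        have h2 : PySem.List.pyGet? (m ++ [c]) ((k : Int) + 1)
            = PySem.List.pyGet? m ((k : Int) + 1) := by
          rw [show ((k : Int) + 1) = ((k + 1 : Nat) : Int) by push_cast; ring,
            PySem.List.pyGet?_natCast, PySem.List.pyGet?_natCast,
            List.getElem?_append_left (by omega)]
        rw [h1, h2]
      rw [hinner]
      have hfoldA : (PySem.List.pyRange 0 ((m.length - 1 : Nat) : Int)).foldl
          (pvCamelStep m) 0 = pvCamelA m := by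
        unfold pvCamelA; rw [hcast]
      rw [hfoldA, ih, pvCamel_snoc]
      simp only [List.foldl_cons, List.foldl_nil]
      have hlast : PySem.List.pyGet? (m ++ [c]) ((m.length - 1 : Nat) : Int) = m.getLast? := by
        rw [PySem.List.pyGet?_natCast, List.getElem?_append_left (by omega),
          List.getLast?_eq_getElem?]
      have hc2 : PySem.List.pyGet? (m ++ [c]) (((m.length - 1 : Nat) : Int) + 1) = some c := by
        rw [show (((m.length - 1 : Nat) : Int) + 1) = ((m.length : Nat) : Int) by rw [hcast]; ring,
          PySem.List.pyGet?_natCast, List.getElem?_concat_length]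
      unfold pvCamelStep
      rw [hlast, hc2]
      rcases hL : m.getLast? with _ | p
      · rw [hm] at hL; simp at hL
      · simp only [pvPair]
        split <;> ring

-- B's loop state mirrors A's (longest, current) through the whole fold
lemma pvLoop_eq (t : List Char) : ∀ (L C : List Char),
    t.foldl pvStepB ((L.length : Int), pvCamel L, (C.length : Int), pvCamel C, C.getLast?)
      = (((t.foldl pvStepA (L, C)).1.length : Int), pvCamel (t.foldl pvStepA (L, C)).1,
         ((t.foldl pvStepA (L, C)).2.length : Int), pvCamel (t.foldl pvStepA (L, C)).2,
         (t.foldl pvStepA (L, C)).2.getLast?) := by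
  induction t with
  | nil => intro L C; rfl
  | cons c t ih =>
    intro L C
    simp only [List.foldl_cons]
    by_cases hb : pvBoundary.contains c
    · by_cases hlen : C.length > L.length
      · have h1 : pvStepB ((L.length : Int), pvCamel L, (C.length : Int), pvCamel C, C.getLast?) c
            = ((C.length : Int), pvCamel C, 0, 0, none) := by
          simp only [pvStepB, hb, if_true]
          rw [if_pos (by exact_mod_cast hlen)]
        have h2 : pvStepA (L, C) c = (C, []) := by
          simp only [pvStepA, hb, if_true, if_pos hlen]
        rw [h1, h2]
        have := ih C []
        simpa [pvCamel] using this
      · have h1 : pvStepB ((L.length : Int), pvCamel L, (C.length : Int), pvCamel C, C.getLast?) c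
            = ((L.length : Int), pvCamel L, 0, 0, none) := by
          simp only [pvStepB, hb, if_true]
          rw [if_neg (by exact_mod_cast hlen)]
        have h2 : pvStepA (L, C) c = (L, []) := by
          simp only [pvStepA, hb, if_true, if_neg hlen]
        rw [h1, h2]
        have := ih L []
        simpa [pvCamel] using this
    · have h1 : pvStepB ((L.length : Int), pvCamel L, (C.length : Int), pvCamel C, C.getLast?) c
          = ((L.length : Int), pvCamel L, ((C ++ [c]).length : Int), pvCamel (C ++ [c]),
             (C ++ [c]).getLast?) := by
        have hb' : c ∉ pvBoundary := by simpa using hb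
        rcases hP : C.getLast? with _ | p <;>
          simp [pvStepB, hb', pvCamel_snoc, pvPair, hP]
      have h2 : pvStepA (L, C) c = (L, C ++ [c]) := by
        simp only [pvStepA, hb, if_false, Bool.false_eq_true]
      rw [h1, h2, ih]

-- ===== VERDICT (by name: the statement is the Claim_ definition above) =====
theorem looks_like_ime_composition_spec : Claim_equal_looks_like_ime_composition := by
  intro sample _
  unfold Spec_looks_like_ime_composition
  unfold looks_like_ime_composition looks_like_ime_composition_alt
  by_cases h0 : sample.toList = []
  · simp [h0]
  · simp only [h0, if_false]
    set s := PySem.Chars.strip sample.toList with hs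
    by_cases h1 : s.length < 12
    · simp [h1]
    · simp only [h1, if_false]
      by_cases h2 : s.any (fun c => decide (127 < c.toNat) && PySem.Chars.isalpha c)
      · simp [h2]
      · simp only [h2, if_false, Bool.false_eq_true]
        -- relate the two loops
        have hB : (s ++ [' ']).foldl pvStepB (0, 0, 0, 0, none)
            = pvStepB (s.foldl pvStepB (0, 0, 0, 0, none)) ' ' := by
          rw [List.foldl_append]; rfl
        have hinit : ((0 : Int), (0 : Int), (0 : Int), (0 : Int), (none : Option Char))
            = ((([] : List Char).length : Int), pvCamel [], (([] : List Char).length : Int),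
               pvCamel [], ([] : List Char).getLast?) := by rfl
        set st := s.foldl pvStepA (([] : List Char), ([] : List Char)) with hst
        have hloop := pvLoop_eq s [] []
        rw [hB, hinit, hloop]
        set longest := if st.2.length > st.1.length then st.2 else st.1 with hlg
        have hflush : pvStepB (((st.1.length : Int), pvCamel st.1, (st.2.length : Int),
            pvCamel st.2, st.2.getLast?)) ' '
            = ((longest.length : Int), pvCamel longest, 0, 0, none) := by
          simp only [pvStepB, show pvBoundary.contains ' ' = true from rfl, if_true]
          by_cases hl : st.2.length > st.1.length
          · rw [if_pos (by exact_mod_cast hl)]; simp [hlg, hl]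
          · rw [if_neg (by exact_mod_cast hl)]; simp [hlg, hl]
        rw [← hst, hflush]
        change (if longest.length < 12 then false
            else if pvCamelA longest ≥ 2 then false else true)
          = (if (longest.length : Int) < 12 then false else decide (pvCamel longest < 2))
        rw [pvCamelA_eq]
        by_cases h3 : longest.length < 12
        · rw [if_pos h3, if_pos (show (longest.length : Int) < 12 by exact_mod_cast h3)]
        · rw [if_neg h3, if_neg (show ¬ (longest.length : Int) < 12 by exact_mod_cast h3)]
          by_cases h4 : pvCamel longest ≥ 2
          · rw [if_pos h4]
            symm; simp only [decide_eq_false_iff_not]; omega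
          · rw [if_neg h4]
            symm; simp only [decide_eq_true_eq]; omega
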